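-- pv_equiv track=rewrite | github.com/Titus-Manoj/LeetCode-Solutions | 2249-count-the-hidden-sequences/2249-count-the-hidden-sequences.py | numberOfArrays
-- ===== SOURCE A (Python) =====
-- from typing import List
--
-- def numberOfArrays(dif: List[int], lower: int, upper: int) -> int:
--     arr = [0]
--     for i in range(len(dif)):
--         temp = arr[i] + dif[i]
--         arr.append(temp)
--
--     u = upper - max(arr)
--     l = lower - min(arr)
--
--     return u - l + 1 if u>=l else 0
-- ===== SOURCE B (Python) =====
-- def numberOfArrays(dif, lower, upper):
--     # Backward interval propagation: maintain the interval [lo, hi] of values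
--     # that may start the remaining suffix so that the whole hidden sequence
--     # stays within [lower, upper]; no prefix sums are ever computed.
--     lo, hi = lower, upper
--     for d in reversed(dif):
--         lo = max(lower, lo - d)
--         hi = min(upper, hi - d)
--     return hi - lo + 1 if hi >= lo else 0
-- ===== Notes on version B (the rewrite author's own statement) =====
-- stated objective: alternative
-- what changed: Instead of building the prefix-sum array and deriving the answer from its max and min, B walks dif backwards propagating the feasible interval [lo, hi] of values that may start the remaining suffix (lo = max(lower, lo-d), hi = min(upper, hi-d)) and returns the size of the final interval; no prefix sums are computed.
import Mathlib
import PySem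

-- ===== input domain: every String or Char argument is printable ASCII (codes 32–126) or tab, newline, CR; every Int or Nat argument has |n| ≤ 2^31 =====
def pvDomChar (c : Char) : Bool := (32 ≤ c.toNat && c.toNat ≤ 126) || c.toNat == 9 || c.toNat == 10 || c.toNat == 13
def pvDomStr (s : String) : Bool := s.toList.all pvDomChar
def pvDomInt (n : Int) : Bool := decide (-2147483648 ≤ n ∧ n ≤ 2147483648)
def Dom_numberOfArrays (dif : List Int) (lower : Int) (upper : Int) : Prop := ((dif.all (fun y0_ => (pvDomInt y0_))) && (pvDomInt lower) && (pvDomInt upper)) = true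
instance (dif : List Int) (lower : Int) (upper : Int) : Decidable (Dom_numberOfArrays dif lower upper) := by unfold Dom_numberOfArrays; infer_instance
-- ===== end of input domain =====

-- B replaces A's prefix-sum array with max()/min() scans by a backward pass over dif
-- that propagates the feasible interval of starting values (alternative algorithm).

-- ===== PORT A =====
-- arr = [0]; for i in range(len(dif)): arr.append(arr[i] + dif[i]); then max/min scans.
def numberOfArrays (dif : List Int) (lower : Int) (upper : Int) : Int :=
  let arr := (PySem.List.pyRange 0 (dif.length : Int) 1).foldl
      (fun arr i => arr ++ [PySem.List.pyGetD arr i 0 + PySem.List.pyGetD dif i 0]) [0]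
  match PySem.List.max? arr (fun x => x), PySem.List.min? arr (fun x => x) with
  | some mx, some mn =>
      let u := upper - mx
      let l := lower - mn
      if u ≥ l then u - l + 1 else 0
  | _, _ => 0  -- unreachable: arr starts as [0] and only grows, so max/min never see []

-- ===== PORT B =====
-- lo, hi = lower, upper; for d in reversed(dif): lo = max(lower, lo-d); hi = min(upper, hi-d)
def numberOfArrays_alt (dif : List Int) (lower : Int) (upper : Int) : Int :=
  let s := dif.reverse.foldl
      (fun (p : Int × Int) d => (max lower (p.1 - d), min upper (p.2 - d)))
      (lower, upper)
  if s.2 ≥ s.1 then s.2 - s.1 + 1 else 0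

-- ===== PRECONDITION & SPEC =====
def Spec_numberOfArrays (dif : List Int) (lower : Int) (upper : Int) (out : Int) : Prop := out = numberOfArrays_alt dif lower upper
instance (dif : List Int) (lower : Int) (upper : Int) (out : Int) : Decidable (Spec_numberOfArrays dif lower upper out) := by unfold Spec_numberOfArrays; infer_instance

-- ===== CLAIM (what is proved, stated in full; the proofs are below) =====
def Claim_equal_numberOfArrays : Prop := ∀ (dif : List Int) (lower : Int) (upper : Int), Dom_numberOfArrays dif lower upper → Spec_numberOfArrays dif lower upper (numberOfArrays dif lower upper)

-- ===== LEMMAS AND PROOFS =====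

-- A side: the prefix-sum list.  scanOf c [d1,…,dn] = [c+d1, c+d1+d2, …]
def scanOf (c : Int) : List Int → List Int
  | [] => []
  | d :: ds => (c + d) :: scanOf (c + d) ds

def sendOf (c : Int) (ds : List Int) : Int := ds.foldl (· + ·) c

-- recursive max / min over the prefix sums (including the empty prefix 0)
def mxOf : List Int → Int
  | [] => 0
  | d :: ds => max 0 (d + mxOf ds)

def mnOf : List Int → Int
  | [] => 0
  | d :: ds => min 0 (d + mnOf ds)

-- B side, as a structural recursion from the right end of dif
def intervalOf (lower upper : Int) : List Int → Int × Int
  | [] => (lower, upper)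
  | d :: ds =>
      let p := intervalOf lower upper ds
      (max lower (p.1 - d), min upper (p.2 - d))

theorem sendOf_cons (c y : Int) (ds : List Int) : sendOf c (y :: ds) = sendOf (c + y) ds := rfl

theorem length_scanOf (c : Int) (ds : List Int) : (scanOf c ds).length = ds.length := by
  induction ds generalizing c with
  | nil => rfl
  | cons d ds ih => simp [scanOf, ih]

theorem scanOf_append (c d : Int) (ys : List Int) :
    scanOf c (ys ++ [d]) = scanOf c ys ++ [sendOf c ys + d] := by
  induction ys generalizing c with
  | nil => rfl
  | cons y ys ih => simp [scanOf, ih, sendOf_cons]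

theorem getLast?_cons_scanOf (c : Int) (ds : List Int) :
    (c :: scanOf c ds).getLast? = some (sendOf c ds) := by
  induction ds generalizing c with
  | nil => rfl
  | cons d ds ih =>
    simp only [scanOf, sendOf_cons]
    rw [List.getLast?_cons_cons, ih]

-- A's loop builds exactly 0 :: scanOf 0 dif
theorem arrA_eq (dif : List Int) :
    (PySem.List.pyRange 0 (dif.length : Int) 1).foldl
      (fun arr i => arr ++ [PySem.List.pyGetD arr i 0 + PySem.List.pyGetD dif i 0]) [0]
      = 0 :: scanOf 0 dif := by
  induction dif using List.reverseRecOn with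
  | nil => rfl
  | append_singleton ys d ih =>
    have hlen : ((ys ++ [d]).length : Int) = (ys.length : Int) + 1 := by
      simp
    rw [hlen, PySem.List.pyRange_one_succ_right (by positivity), List.foldl_append]
    have hcongr : (PySem.List.pyRange 0 (ys.length : Int) 1).foldl
        (fun arr i => arr ++ [PySem.List.pyGetD arr i 0 + PySem.List.pyGetD (ys ++ [d]) i 0]) [0]
        = (PySem.List.pyRange 0 (ys.length : Int) 1).foldl
        (fun arr i => arr ++ [PySem.List.pyGetD arr i 0 + PySem.List.pyGetD ys i 0]) [0] := by
      apply PySem.List.foldl_congr_mem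
      intro acc i hi
      rw [PySem.List.mem_pyRange_one] at hi
      obtain ⟨k, rfl⟩ : ∃ k : Nat, i = (k : Int) :=
        ⟨i.toNat, (Int.toNat_of_nonneg hi.1).symm⟩
      have hk : k < ys.length := by exact_mod_cast hi.2
      have h1 : PySem.List.pyGetD (ys ++ [d]) (k : Int) 0 = PySem.List.pyGetD ys (k : Int) 0 := by
        rw [PySem.List.pyGetD_natCast, PySem.List.pyGetD_natCast]
        simp [List.getD, List.getElem?_append_left hk]
      rw [h1]
    rw [hcongr, ih]
    have hd : PySem.List.pyGetD (ys ++ [d]) ((ys.length : Nat) : Int) 0 = d := by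
      rw [PySem.List.pyGetD_natCast]
      simp [List.getD]
    have hlast : PySem.List.pyGetD (0 :: scanOf 0 ys) ((ys.length : Nat) : Int) 0
        = sendOf 0 ys := by
      rw [PySem.List.pyGetD_natCast]
      rcases ys.eq_nil_or_concat with h | ⟨zs, z, h⟩
      · subst h; rfl
      · have hne : scanOf 0 ys ≠ [] := by
          intro hc
          have := length_scanOf 0 ys
          rw [hc] at this
          simp [h] at this
        have hl : (0 :: scanOf 0 ys).getD ys.length 0 = (0 :: scanOf 0 ys).getLast (by simp) := by
          rw [List.getLast_eq_getElem, List.getD_eq_getElem]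
          · congr 1
            simp [length_scanOf]
          · simp [length_scanOf]
        have h2 := getLast?_cons_scanOf 0 ys
        rw [List.getLast?_eq_some_getLast (l := 0 :: scanOf 0 ys) (by simp)] at h2
        rw [hl]
        exact Option.some.inj h2
    simp only [List.foldl_cons, List.foldl_nil, hd, hlast, scanOf_append]
    simp

-- the max()/min() scans over the prefix-sum list compute mxOf / mnOf
theorem foldl_max_scan (ds : List Int) : ∀ c a, (scanOf c ds).foldl max (max a c) = max a (c + mxOf ds) := by
  induction ds with
  | nil => intro c a; simp [scanOf, mxOf]
  | cons d ds ih =>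
    intro c a
    have h := ih (c + d) (max a c)
    simp only [scanOf, mxOf, List.foldl_cons]
    rw [h]
    omega

theorem foldl_min_scan (ds : List Int) : ∀ c a, (scanOf c ds).foldl min (min a c) = min a (c + mnOf ds) := by
  induction ds with
  | nil => intro c a; simp [scanOf, mnOf]
  | cons d ds ih =>
    intro c a
    have h := ih (c + d) (min a c)
    simp only [scanOf, mnOf, List.foldl_cons]
    rw [h]
    omega

theorem mxOf_nonneg (ds : List Int) : 0 ≤ mxOf ds := by
  cases ds <;> simp [mxOf]

theorem mnOf_nonpos (ds : List Int) : mnOf ds ≤ 0 := by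
  cases ds <;> simp [mnOf]

-- B's reversed-loop fold is the structural recursion intervalOf
theorem foldB_eq (lower upper : Int) (dif : List Int) :
    dif.reverse.foldl
      (fun (p : Int × Int) d => (max lower (p.1 - d), min upper (p.2 - d)))
      (lower, upper) = intervalOf lower upper dif := by
  rw [List.foldl_reverse]
  induction dif with
  | nil => rfl
  | cons d ds ih => simp [intervalOf, ih]

-- the interval computed backwards is exactly the set of valid starting values
theorem interval_mem (lower upper : Int) (ds : List Int) :
    ∀ x, ((intervalOf lower upper ds).1 ≤ x ∧ x ≤ (intervalOf lower upper ds).2)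
      ↔ (lower - mnOf ds ≤ x ∧ x ≤ upper - mxOf ds) := by
  induction ds with
  | nil => intro x; simp [intervalOf, mxOf, mnOf]
  | cons d ds ih =>
    intro x
    have h := ih (x + d)
    simp only [intervalOf, mxOf, mnOf] at *
    omega

-- ===== VERDICT (by name: the statement is the Claim_ definition above) =====
theorem numberOfArrays_spec : Claim_equal_numberOfArrays := by
  intro dif lower upper _
  unfold Spec_numberOfArrays numberOfArrays numberOfArrays_alt
  rw [arrA_eq, foldB_eq]
  simp only [PySem.List.max?_id_cons, PySem.List.min?_id_cons]
  have hmx : (scanOf 0 dif).foldl max 0 = max 0 (0 + mxOf dif) := by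
    have := foldl_max_scan dif 0 0
    simpa using this
  have hmn : (scanOf 0 dif).foldl min 0 = min 0 (0 + mnOf dif) := by
    have := foldl_min_scan dif 0 0
    simpa using this
  rw [hmx, hmn]
  have h1 := interval_mem lower upper dif (lower - mnOf dif)
  have h2 := interval_mem lower upper dif (upper - mxOf dif)
  have h3 := interval_mem lower upper dif (intervalOf lower upper dif).1
  have h4 := interval_mem lower upper dif (intervalOf lower upper dif).2
  have hp := mxOf_nonneg dif
  have hq := mnOf_nonpos dif
  split_ifs <;> omega
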